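-- pv_equiv track=rewrite | github.com/kevinroyhobson/2000.news | backend/Tournament/tournament.py | split_by_rank
-- ===== SOURCE A (Python) =====
-- def split_by_rank(headlines_by_rank: dict, survivor_count: int) -> tuple:
--     """Split ranked headlines into survivors (top N) and non-survivors."""
--     survivors = []
--     non_survivors = []
--
--     # headlines_by_rank is {rank_str: [headline_ids]} — flatten in rank order
--     all_ranked = []
--     for rank_str in sorted(headlines_by_rank.keys(), key=int):
--         for hid in headlines_by_rank[rank_str]:
--             all_ranked.append((int(rank_str), hid))
--
--     for rank, hid in all_ranked:
--         if len(survivors) < survivor_count: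
--             survivors.append((rank, hid))
--         else:
--             non_survivors.append(hid)
--
--     return survivors, non_survivors
-- ===== SOURCE B (Python) =====
-- def split_by_rank(headlines_by_rank: dict, survivor_count: int) -> tuple:
--     """Split ranked headlines into survivors (top N) and non-survivors."""
--     # Recursive group-wise split with a remaining budget: no flattened list is
--     # ever built; each rank group is cut once with min/max arithmetic.
--     def go(ranks, budget):
--         if not ranks:
--             return [], []
--         rank_str = ranks[0]
--         hids = headlines_by_rank[rank_str]
--         k = min(max(budget, 0), len(hids))
--         surv, non = go(ranks[1:], budget - len(hids))
--         return [(int(rank_str), h) for h in hids[:k]] + surv, hids[k:] + non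
--     return go(sorted(headlines_by_rank, key=int), survivor_count)
-- ===== Notes on version B (the rewrite author's own statement) =====
-- stated objective: alternative
-- what changed: Instead of flattening all (rank,id) pairs into one list and counting survivors per element, B recurses over the sorted rank groups carrying a remaining budget and cuts each group once with min/max arithmetic, concatenating the per-group pieces back-to-front.
import Mathlib
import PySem

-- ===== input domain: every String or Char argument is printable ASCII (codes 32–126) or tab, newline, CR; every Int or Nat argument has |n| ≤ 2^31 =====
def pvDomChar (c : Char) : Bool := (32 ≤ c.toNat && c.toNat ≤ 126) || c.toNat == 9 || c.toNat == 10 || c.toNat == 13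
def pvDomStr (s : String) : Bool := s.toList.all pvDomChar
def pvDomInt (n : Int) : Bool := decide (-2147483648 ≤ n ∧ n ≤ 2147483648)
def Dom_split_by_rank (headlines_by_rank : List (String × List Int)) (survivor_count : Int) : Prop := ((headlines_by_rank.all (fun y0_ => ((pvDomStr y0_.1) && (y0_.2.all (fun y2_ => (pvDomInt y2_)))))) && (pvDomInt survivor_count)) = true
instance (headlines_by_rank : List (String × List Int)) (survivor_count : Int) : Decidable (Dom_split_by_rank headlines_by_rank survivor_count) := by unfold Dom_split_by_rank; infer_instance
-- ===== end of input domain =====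

-- B replaces A's flatten-then-count loop by a budget-carrying recursion over the
-- sorted rank groups that cuts each group once; alternative decomposition, same cost.

-- ===== PORT A =====
-- int(rank_str); total stand-in, exact under Pre_ (every key parses as an int)
def pvKeyInt (k : String) : Int := (PySem.Int.ofStr? k).getD 0

def split_by_rank (headlines_by_rank : List (String × List Int)) (survivor_count : Int) : (List (Int × Int)) × List Int :=
  let d : PySem.Dict String (List Int) := PySem.Dict.ofList headlines_by_rank
  let all_ranked : List (Int × Int) :=
    (PySem.List.sorted d.keys pvKeyInt false).foldl
      (fun acc rank_str =>
        (d.getD rank_str []).foldl (fun acc hid => acc ++ [(pvKeyInt rank_str, hid)]) acc) []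
  let p : List (Int × Int) × List Int :=
    all_ranked.foldl
      (fun (st : List (Int × Int) × List Int) rh =>
        if (st.1.length : Int) < survivor_count then (st.1 ++ [rh], st.2)
        else (st.1, st.2 ++ [rh.2])) ([], [])
  p

-- ===== PORT B =====
-- Source B's inner 'go': recursion over the sorted key list with the remaining budget.
-- hids[:k] / hids[k:] with 0 ≤ k ≤ len(hids) are exactly take/drop k.toNat.
def pvGoB (d : PySem.Dict String (List Int)) : List String → Int → (List (Int × Int)) × List Int
  | [], _ => ([], [])
  | rank_str :: rest, budget =>
    let hids := d.getD rank_str []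
    let k : Int := min (max budget 0) (hids.length : Int)
    let p := pvGoB d rest (budget - hids.length)
    ((hids.take k.toNat).map (fun h => (pvKeyInt rank_str, h)) ++ p.1,
     hids.drop k.toNat ++ p.2)

def split_by_rank_alt (headlines_by_rank : List (String × List Int)) (survivor_count : Int) : (List (Int × Int)) × List Int :=
  let d : PySem.Dict String (List Int) := PySem.Dict.ofList headlines_by_rank
  pvGoB d (PySem.List.sorted d.keys pvKeyInt false) survivor_count

-- ===== PRECONDITION & SPEC =====
-- Pre_: every dict key must parse as a Python int (int(rank_str)); otherwise A raises ValueError.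
def Pre_split_by_rank (headlines_by_rank : List (String × List Int)) (survivor_count : Int) : Prop :=
  ∀ p ∈ headlines_by_rank, (PySem.Int.ofStr? p.1).isSome
instance (headlines_by_rank : List (String × List Int)) (survivor_count : Int) : Decidable (Pre_split_by_rank headlines_by_rank survivor_count) := by unfold Pre_split_by_rank; infer_instance
def pvWitness_split_by_rank : (List (String × List Int)) × Int := ([("2", [5, 6]), ("1", [7])], 2)

def Spec_split_by_rank (headlines_by_rank : List (String × List Int)) (survivor_count : Int) (out : (List (Int × Int)) × List Int) : Prop := out = split_by_rank_alt headlines_by_rank survivor_count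
instance (headlines_by_rank : List (String × List Int)) (survivor_count : Int) (out : (List (Int × Int)) × List Int) : Decidable (Spec_split_by_rank headlines_by_rank survivor_count out) := by unfold Spec_split_by_rank; infer_instance

-- ===== CLAIM (what is proved, stated in full; the proofs are below) =====
def Claim_equal_split_by_rank : Prop := ∀ (headlines_by_rank : List (String × List Int)) (survivor_count : Int), Dom_split_by_rank headlines_by_rank survivor_count → Pre_split_by_rank headlines_by_rank survivor_count → Spec_split_by_rank headlines_by_rank survivor_count (split_by_rank headlines_by_rank survivor_count)

-- ===== LEMMAS AND PROOFS =====

theorem flatMap_singleton_eq_map {α β : Type} (l : List α) (f : α → β) :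
    l.flatMap (fun x => [f x]) = l.map f := by
  induction l with
  | nil => rfl
  | cons a l ih => simp [ih]

-- A's counting loop, started at (s, ns), appends the next (sc - |s|)⁺ pairs to s and the
-- remaining ids to ns.
theorem count_loop_split (sc : Int) (L : List (Int × Int)) (s : List (Int × Int)) (ns : List Int) :
    L.foldl (fun (st : List (Int × Int) × List Int) rh =>
        if (st.1.length : Int) < sc then (st.1 ++ [rh], st.2)
        else (st.1, st.2 ++ [rh.2])) (s, ns)
      = (s ++ L.take (sc - s.length).toNat, ns ++ ((L.drop (sc - s.length).toNat).map (·.2))) := by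
  induction L generalizing s ns with
  | nil => simp
  | cons rh L ih =>
    by_cases h : (s.length : Int) < sc
    · have hpos : (sc - s.length).toNat = (sc - (s ++ [rh]).length).toNat + 1 := by
        simp only [List.length_append, List.length_cons, List.length_nil]
        omega
      simp only [List.foldl_cons, if_pos h, ih (s ++ [rh]) ns, hpos]
      simp
    · have h0 : (sc - s.length).toNat = 0 := by omega
      simp only [List.foldl_cons, if_neg h, ih s (ns ++ [rh.2]), h0]
      simp

-- B's budget recursion produces exactly the positional split of the flattened list.
theorem take_min_len {α : Type} (l : List α) (n : Nat) : l.take (min n l.length) = l.take n := by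
  rcases le_total n l.length with h | h
  · rw [min_eq_left h]
  · rw [min_eq_right h, List.take_of_length_le h, List.take_length]

theorem drop_min_len {α : Type} (l : List α) (n : Nat) : l.drop (min n l.length) = l.drop n := by
  rcases le_total n l.length with h | h
  · rw [min_eq_left h]
  · rw [min_eq_right h, List.drop_of_length_le h, List.drop_length]

theorem pvGoB_eq_split (d : PySem.Dict String (List Int)) (ks : List String) (b : Int) :
    pvGoB d ks b
      = (let L := ks.flatMap (fun r => (d.getD r []).map (fun h => (pvKeyInt r, h)))
         (L.take b.toNat, (L.drop b.toNat).map (·.2))) := by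
  induction ks generalizing b with
  | nil => simp [pvGoB]
  | cons r rest ih =>
    simp only [pvGoB, ih, List.flatMap_cons]
    have hk : (min (max b 0) (((d.getD r []).length : Nat) : Int)).toNat
        = min b.toNat (d.getD r []).length := by omega
    have hb : (b - (((d.getD r []).length : Nat) : Int)).toNat
        = b.toNat - (d.getD r []).length := by omega
    rw [hk, hb, List.take_append, List.drop_append]
    simp only [List.length_map, List.map_append, List.map_take, List.map_drop, List.map_map,
      Prod.mk.injEq]
    refine ⟨?_, ?_⟩
    · rw [show min b.toNat (d.getD r []).length
          = min b.toNat ((d.getD r []).map (fun h => (pvKeyInt r, h))).length by simp,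
        take_min_len]
    rw [drop_min_len]
    simp

-- ===== VERDICT (by name: the statement is the Claim_ definition above) =====
theorem split_by_rank_spec : Claim_equal_split_by_rank := by
  intro hbr sc _ _
  unfold Spec_split_by_rank split_by_rank split_by_rank_alt
  simp only [PySem.List.foldl_append_eq_flatMap, flatMap_singleton_eq_map, List.nil_append]
  set d := PySem.Dict.ofList hbr with hd
  set L := (PySem.List.sorted d.keys pvKeyInt false).flatMap
      (fun rank_str => (d.getD rank_str []).map (fun hid => (pvKeyInt rank_str, hid))) with hL
  rw [count_loop_split sc L [] [], pvGoB_eq_split]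
  simp [← hL]
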